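-- pv_equiv track=rewrite | github.com/vaibhav-jain-dev/learning-algo | problems/200-must-solve/dynamic-programming/01-max-subset-sum/python_code.py | max_subset_with_indices
-- ===== SOURCE A (Python) =====
-- def max_subset_with_indices(array):
--     """Return both max sum and the indices used."""
--     if not array:
--         return 0, []
--     if len(array) == 1:
--         return array[0], [0]
--
--     n = len(array)
--     dp = [0] * n
--     dp[0] = array[0]
--     dp[1] = max(array[0], array[1])
--
--     for i in range(2, n):
--         dp[i] = max(dp[i-1], dp[i-2] + array[i])
--
--     # Backtrack to find indices
--     indices = []
--     i = n - 1
--     while i >= 0: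
--         if i == 0:
--             indices.append(0)
--             break
--         elif i == 1:
--             if dp[1] == array[1]:
--                 indices.append(1)
--             else:
--                 indices.append(0)
--             break
--         elif dp[i] == dp[i-2] + array[i]:
--             indices.append(i)
--             i -= 2
--         else:
--             i -= 1
--
--     return dp[-1], list(reversed(indices))
-- ===== SOURCE B (Python) =====
-- def max_subset_with_indices(array):
--     """Return both max sum and the indices used.
--
--     Single forward pass with two rolling (sum, chain) states, where a chain is
--     a parent-pointer tuple (index, parent) shared between states, so no dp
--     array, no backward backtracking loop, and no list copying."""
--     if not array:
--         return 0, []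
--     if len(array) == 1:
--         return array[0], [0]
--     prev = (array[0], (0, None))
--     cur = (array[1], (1, None)) if array[1] >= array[0] else (array[0], (0, None))
--     for i, x in enumerate(array[2:], 2):
--         if prev[0] + x >= cur[0]:
--             prev, cur = cur, (prev[0] + x, (i, prev[1]))
--         else:
--             prev = cur
--     total, chain = cur
--     indices = []
--     while chain is not None:
--         i, chain = chain
--         indices.append(i)
--     indices.reverse()
--     return total, indices
-- ===== Notes on version B (the rewrite author's own statement) =====
-- stated objective: faster
-- what changed: B replaces A's preallocated dp array plus backward backtracking while-loop by a single forward pass carrying two rolling (sum, parent-pointer index chain) states, deciding include-vs-exclude on the fly with the same >=-tie rule and flattening the winning chain at the end.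
import Mathlib
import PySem

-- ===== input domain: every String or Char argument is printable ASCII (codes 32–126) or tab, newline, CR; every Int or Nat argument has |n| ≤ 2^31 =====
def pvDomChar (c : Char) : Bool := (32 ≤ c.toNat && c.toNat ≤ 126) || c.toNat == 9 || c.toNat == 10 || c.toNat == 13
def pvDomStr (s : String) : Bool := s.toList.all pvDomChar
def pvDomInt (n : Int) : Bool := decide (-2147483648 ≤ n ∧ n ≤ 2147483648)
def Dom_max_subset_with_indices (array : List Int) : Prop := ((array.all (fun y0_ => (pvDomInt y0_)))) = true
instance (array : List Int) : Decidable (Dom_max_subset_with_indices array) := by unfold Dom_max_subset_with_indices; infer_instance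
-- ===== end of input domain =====

-- B replaces A's dp array + backward backtracking while-loop by a single forward pass
-- carrying two rolling (sum, index-chain) states (objective: faster, measured by the
-- timing run; same O(n) growth, smaller constants).

-- ===== PORT A =====
-- the backtracking while-loop of A: i is the loop variable, acc the `indices` list
def btA (array dp : List Int) (i : Int) (acc : List Int) : List Int :=
  if i < 0 then acc                      -- while i >= 0 fails: loop exits
  else if i = 0 then acc ++ [0]
  else if i = 1 then
    (if PySem.List.pyGetD dp 1 0 = PySem.List.pyGetD array 1 0 then acc ++ [1] else acc ++ [0])
  else if PySem.List.pyGetD dp i 0 = PySem.List.pyGetD dp (i - 2) 0 + PySem.List.pyGetD array i 0 then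
    btA array dp (i - 2) (acc ++ [i])
  else
    btA array dp (i - 1) acc
termination_by i.toNat
decreasing_by all_goals omega

-- literal port of A; all indices used are in range, so pyGetD/pySetD are exact there
def max_subset_with_indices (array : List Int) : Int × List Int :=
  if array = [] then (0, [])
  else if array.length = 1 then (PySem.List.pyGetD array 0 0, [0])
  else
    let n : Int := array.length
    let dp0 : List Int := List.replicate array.length (0 : Int)
    let dp1 := PySem.List.pySetD dp0 0 (PySem.List.pyGetD array 0 0)
    let dp2 := PySem.List.pySetD dp1 1
      (max (PySem.List.pyGetD array 0 0) (PySem.List.pyGetD array 1 0))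
    let dp := (PySem.List.pyRange 2 n 1).foldl
      (fun d i => PySem.List.pySetD d i
        (max (PySem.List.pyGetD d (i - 1) 0)
             (PySem.List.pyGetD d (i - 2) 0 + PySem.List.pyGetD array i 0))) dp2
    let indices := btA array dp (n - 1) []
    (PySem.List.pyGetD dp (-1) 0, indices.reverse)

-- ===== PORT B =====
-- literal port of Source B: a parent-pointer chain (i, parent) is a cons-list `i :: parent`
-- (None = []); the for-loop over enumerate(array[2:], 2) is a foldl whose state is the
-- pair (prev, cur); in the cons branch array[2:] is the tail `rest`
def flattenChain : List Int → List Int → List Int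
  | [], acc => acc
  | i :: c, acc => flattenChain c (acc ++ [i])

def max_subset_with_indices_alt (array : List Int) : Int × List Int :=
  match array with
  | [] => (0, [])
  | [a] => (a, [0])
  | a0 :: a1 :: rest =>
    let init : (Int × List Int) × (Int × List Int) :=
      ((a0, [0]), if a1 ≥ a0 then (a1, [1]) else (a0, [0]))
    let fin := (PySem.List.enumerate rest 2).foldl
      (fun st p =>
        if st.1.1 + p.2 ≥ st.2.1 then (st.2, (st.1.1 + p.2, p.1 :: st.1.2))
        else (st.2, st.2)) init
    let indices := flattenChain fin.2.2 []
    (fin.2.1, indices.reverse)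

-- ===== PRECONDITION & SPEC =====
def Spec_max_subset_with_indices (array : List Int) (out : Int × List Int) : Prop := out = max_subset_with_indices_alt array
instance (array : List Int) (out : Int × List Int) : Decidable (Spec_max_subset_with_indices array out) := by unfold Spec_max_subset_with_indices; infer_instance

-- ===== CLAIM (what is proved, stated in full; the proofs are below) =====
def Claim_equal_max_subset_with_indices : Prop := ∀ (array : List Int), Dom_max_subset_with_indices array → Spec_max_subset_with_indices array (max_subset_with_indices array)

-- ===== LEMMAS AND PROOFS =====

-- the dp values of A past the first two entries, as a plain chain recursion
def dplAux (d2 d1 : Int) : List Int → List Int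
  | [] => []
  | x :: xs => max d1 (d2 + x) :: dplAux d1 (max d1 (d2 + x)) xs

-- last two values of the chain d2, d1, dplAux d2 d1 xs
def dlast (d2 d1 : Int) : List Int → Int × Int
  | [] => (d2, d1)
  | x :: xs => dlast d1 (max d1 (d2 + x)) xs

theorem dplAux_length (d2 d1 : Int) (xs : List Int) : (dplAux d2 d1 xs).length = xs.length := by
  induction xs generalizing d2 d1 with
  | nil => rfl
  | cons x xs ih => simp [dplAux, ih]

theorem dplAux_snoc (d2 d1 : Int) (xs : List Int) (x : Int) :
    dplAux d2 d1 (xs ++ [x]) =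
      dplAux d2 d1 xs ++ [max (dlast d2 d1 xs).2 ((dlast d2 d1 xs).1 + x)] := by
  induction xs generalizing d2 d1 with
  | nil => rfl
  | cons y ys ih => simp [dplAux, dlast, ih]

theorem chain_getD (d2 d1 : Int) (xs : List Int) :
    (d2 :: d1 :: dplAux d2 d1 xs).getD xs.length 0 = (dlast d2 d1 xs).1 ∧
    (d2 :: d1 :: dplAux d2 d1 xs).getD (xs.length + 1) 0 = (dlast d2 d1 xs).2 := by
  induction xs generalizing d2 d1 with
  | nil => simp [dplAux, dlast]
  | cons x xs ih => simpa [dplAux, dlast] using ih d1 (max d1 (d2 + x))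

-- pySetD / pyGetD at nonnegative in-range indices are plain set / getD
theorem pySetD_nat (xs : List Int) (n : Nat) (v : Int) (h : n < xs.length) :
    PySem.List.pySetD xs (n : Int) v = xs.set n v := by
  simp [PySem.List.pySetD, PySem.List.pySet?, PySem.List.pyIdx?, h]

theorem pyGetD_app (xs t : List Int) (i : Int) (d : Int) (h0 : 0 ≤ i) (h1 : i < xs.length) :
    PySem.List.pyGetD (xs ++ t) i d = PySem.List.pyGetD xs i d := by
  rw [PySem.List.pyGetD_eq_getElem _ d h0 (by simp only [List.length_append]; push_cast; omega),
      PySem.List.pyGetD_eq_getElem _ d h0 h1]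
  rw [List.getElem_append_left]

-- A's dp-filling loop computes front ++ dplAux of the remaining tail
theorem loop_eq (array : List Int) (tail : List Int) :
    ∀ (front : List Int), 2 ≤ front.length →
    front.length + tail.length = array.length →
    array.drop front.length = tail →
    (PySem.List.pyRange (front.length : Int) (array.length : Int) 1).foldl
      (fun d i => PySem.List.pySetD d i
        (max (PySem.List.pyGetD d (i - 1) 0)
             (PySem.List.pyGetD d (i - 2) 0 + PySem.List.pyGetD array i 0)))
      (front ++ List.replicate tail.length 0)
    = front ++ dplAux (front.getD (front.length - 2) 0) (front.getD (front.length - 1) 0) tail := by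
  induction tail with
  | nil =>
    intro front h2 hlen hdrop
    simp only [List.length_nil, Nat.add_zero] at hlen
    rw [PySem.List.pyRange_one_eq_nil (by omega)]
    simp [dplAux]
  | cons x xs ih =>
    intro front h2 hlen hdrop
    have hlt : (front.length : Int) < (array.length : Int) := by
      simp only [List.length_cons] at hlen; omega
    rw [PySem.List.pyRange_one_cons hlt]
    rw [List.foldl_cons]
    have e1 : (front.length : Int) - 1 = ((front.length - 1 : Nat) : Int) := by omega
    have e2 : (front.length : Int) - 2 = ((front.length - 2 : Nat) : Int) := by omega
    have hx : array.getD front.length 0 = x := by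
      have : (array.drop front.length)[0]? = some x := by rw [hdrop]; rfl
      rw [List.getElem?_drop] at this
      simp only [Nat.add_zero] at this
      simp [List.getD_eq_getElem?_getD, this]
    have hread1 : (front ++ List.replicate (x :: xs).length (0:Int)).getD (front.length - 1) 0
        = front.getD (front.length - 1) 0 := List.getD_append _ _ _ _ (by omega)
    have hread2 : (front ++ List.replicate (x :: xs).length (0:Int)).getD (front.length - 2) 0
        = front.getD (front.length - 2) 0 := List.getD_append _ _ _ _ (by omega)
    set d1 := front.getD (front.length - 1) 0 with hd1
    set d2 := front.getD (front.length - 2) 0 with hd2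
    have hstep : PySem.List.pySetD (front ++ List.replicate (x :: xs).length (0:Int)) (front.length : Int)
        (max (PySem.List.pyGetD (front ++ List.replicate (x :: xs).length (0:Int)) ((front.length : Int) - 1) 0)
             (PySem.List.pyGetD (front ++ List.replicate (x :: xs).length (0:Int)) ((front.length : Int) - 2) 0
              + PySem.List.pyGetD array (front.length : Int) 0))
        = (front ++ [max d1 (d2 + x)]) ++ List.replicate xs.length 0 := by
      rw [e1, e2]
      rw [PySem.List.pyGetD_natCast, PySem.List.pyGetD_natCast, PySem.List.pyGetD_natCast]
      rw [hread1, hread2, hx]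
      rw [pySetD_nat (front ++ List.replicate (x :: xs).length 0) front.length (max d1 (d2 + x)) (by simp)]
      rw [List.set_append]
      simp [List.replicate_succ]
    rw [hstep]
    have ih' := ih (front ++ [max d1 (d2 + x)]) (by simp; omega)
      (by simp at hlen ⊢; omega)
      (by
        have : array.drop (front.length + 1) = xs := by
          have := congrArg (List.drop 1) hdrop
          simpa [List.drop_drop] using this
        simpa using this)
    have hc : ((front ++ [max d1 (d2 + x)]).length : Int) = (front.length : Int) + 1 := by simp
    have g1 : (front ++ [max d1 (d2 + x)]).getD ((front ++ [max d1 (d2 + x)]).length - 1) 0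
        = max d1 (d2 + x) := by
      rw [List.getD_append_right _ _ _ _ (by simp)]
      simp
    have g2 : (front ++ [max d1 (d2 + x)]).getD ((front ++ [max d1 (d2 + x)]).length - 2) 0 = d1 := by
      rw [List.getD_append _ _ _ _ (by simp; omega)]
      simp [hd1]
    rw [g1, g2] at ih'
    rw [← hc, ih']
    simp [dplAux]

-- dp2 (dp after the two initial assignments) fed into the loop
theorem dp2_eq (a0 a1 : Int) (rest : List Int) :
    PySem.List.pySetD
      (PySem.List.pySetD (List.replicate (a0 :: a1 :: rest).length (0 : Int)) 0
        (PySem.List.pyGetD (a0 :: a1 :: rest) 0 0)) 1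
      (max (PySem.List.pyGetD (a0 :: a1 :: rest) 0 0) (PySem.List.pyGetD (a0 :: a1 :: rest) 1 0))
    = a0 :: max a0 a1 :: List.replicate rest.length 0 := by
  have h01 : (0:Int) ≤ (rest.length:Int) + 1 := by positivity
  simp [h01, PySem.List.pySetD, PySem.List.pySet?, PySem.List.pyIdx?, PySem.List.pyGetD,
        PySem.List.pyGet?, List.replicate_succ]

-- one-step evaluation lemmas for the backtracking loop
theorem btA_neg (array dp : List Int) (i : Int) (acc : List Int) (h : i < 0) :
    btA array dp i acc = acc := by
  rw [btA, if_pos h]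

theorem btA_zero (array dp : List Int) (acc : List Int) :
    btA array dp 0 acc = acc ++ [0] := by
  rw [btA, if_neg (by omega), if_pos rfl]

theorem btA_one (array dp : List Int) (acc : List Int) :
    btA array dp 1 acc =
      (if PySem.List.pyGetD dp 1 0 = PySem.List.pyGetD array 1 0 then acc ++ [1] else acc ++ [0]) := by
  rw [btA, if_neg (by omega), if_neg (by omega), if_pos rfl]

theorem btA_ge2 (array dp : List Int) (i : Int) (acc : List Int) (h : 2 ≤ i) :
    btA array dp i acc =
      (if PySem.List.pyGetD dp i 0 = PySem.List.pyGetD dp (i - 2) 0 + PySem.List.pyGetD array i 0 then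
        btA array dp (i - 2) (acc ++ [i])
      else btA array dp (i - 1) acc) := by
  rw [btA, if_neg (by omega), if_neg (by omega), if_neg (by omega)]

-- the accumulator of the backtracking loop is a prefix of its result
theorem btA_acc_aux (array dp : List Int) :
    ∀ (n : Nat) (i : Int), i.toNat ≤ n → ∀ (acc : List Int),
      btA array dp i acc = acc ++ btA array dp i [] := by
  intro n
  induction n with
  | zero =>
    intro i h acc
    rcases lt_or_ge i 0 with h0 | h0
    · rw [btA_neg _ _ _ _ h0, btA_neg _ _ _ _ h0]; simp
    · have : i = 0 := by omega
      subst this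
      rw [btA_zero, btA_zero]; simp
  | succ n ih =>
    intro i h acc
    rcases lt_or_ge i 0 with h0 | h0
    · rw [btA_neg _ _ _ _ h0, btA_neg _ _ _ _ h0]; simp
    · rcases eq_or_lt_of_le h0 with h1 | h1
      · rw [← h1, btA_zero, btA_zero]; simp
      · rcases eq_or_lt_of_le (by omega : (1:Int) ≤ i) with h2 | h2
        · rw [← h2, btA_one, btA_one]; split_ifs <;> simp
        · have hge : 2 ≤ i := by omega
          rw [btA_ge2 _ _ _ _ hge, btA_ge2 _ _ _ _ hge]
          split_ifs with hcond
          · rw [ih (i - 2) (by omega) (acc ++ [i]), ih (i - 2) (by omega) ([] ++ [i])]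
            simp
          · rw [ih (i - 1) (by omega) acc]

theorem btA_acc (array dp : List Int) (i : Int) (acc : List Int) :
    btA array dp i acc = acc ++ btA array dp i [] :=
  btA_acc_aux array dp i.toNat i le_rfl acc

-- the backtracking loop ignores entries appended past the current index
theorem btA_agree_aux (array dp : List Int) (x v : Int) (h : array.length = dp.length) :
    ∀ (n : Nat) (i : Int), i.toNat ≤ n → i < dp.length → ∀ (acc : List Int),
      btA (array ++ [x]) (dp ++ [v]) i acc = btA array dp i acc := by
  intro n
  induction n with
  | zero =>
    intro i hn hi acc
    rcases lt_or_ge i 0 with h0 | h0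
    · rw [btA_neg _ _ _ _ h0, btA_neg _ _ _ _ h0]
    · have : i = 0 := by omega
      subst this
      rw [btA_zero, btA_zero]
  | succ n ih =>
    intro i hn hi acc
    rcases lt_or_ge i 0 with h0 | h0
    · rw [btA_neg _ _ _ _ h0, btA_neg _ _ _ _ h0]
    · rcases eq_or_lt_of_le h0 with h1 | h1
      · rw [← h1, btA_zero, btA_zero]
      · rcases eq_or_lt_of_le (by omega : (1:Int) ≤ i) with h2 | h2
        · rw [← h2, btA_one, btA_one]
          rw [pyGetD_app dp [v] 1 0 (by omega) (by omega),
              pyGetD_app array [x] 1 0 (by omega) (by omega)]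
        · have hge : 2 ≤ i := by omega
          rw [btA_ge2 _ _ _ _ hge, btA_ge2 _ _ _ _ hge]
          rw [pyGetD_app dp [v] i 0 (by omega) (by omega),
              pyGetD_app dp [v] (i - 2) 0 (by omega) (by omega),
              pyGetD_app array [x] i 0 (by omega) (by omega)]
          split_ifs with hcond
          · rw [ih (i - 2) (by omega) (by omega) (acc ++ [i])]
          · rw [ih (i - 1) (by omega) (by omega) acc]

theorem btA_agree (array dp : List Int) (x v : Int) (h : array.length = dp.length)
    (i : Int) (hi : i < dp.length) (acc : List Int) :
    btA (array ++ [x]) (dp ++ [v]) i acc = btA array dp i acc :=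
  btA_agree_aux array dp x v h i.toNat i le_rfl hi acc

-- the chain-flattening while-loop of Source B returns acc ++ chain
theorem flattenChain_id (c : List Int) : ∀ (acc : List Int), flattenChain c acc = acc ++ c := by
  induction c with
  | nil => intro acc; simp [flattenChain]
  | cons i c ih => intro acc; simp [flattenChain, ih]

-- main invariant: B's forward fold carries exactly (dp value, backtrack list) for the
-- last two indices of the processed prefix
theorem inv (a0 a1 : Int) (rest : List Int) :
    (PySem.List.enumerate rest 2).foldl
      (fun st p =>
        if st.1.1 + p.2 ≥ st.2.1 then (st.2, (st.1.1 + p.2, p.1 :: st.1.2))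
        else (st.2, st.2))
      ((a0, [0]), if a1 ≥ a0 then (a1, [1]) else (a0, [0]))
    = (((a0 :: max a0 a1 :: dplAux a0 (max a0 a1) rest).getD rest.length 0,
        btA (a0 :: a1 :: rest) (a0 :: max a0 a1 :: dplAux a0 (max a0 a1) rest) (rest.length : Int) []),
       ((a0 :: max a0 a1 :: dplAux a0 (max a0 a1) rest).getD (rest.length + 1) 0,
        btA (a0 :: a1 :: rest) (a0 :: max a0 a1 :: dplAux a0 (max a0 a1) rest) ((rest.length : Int) + 1) [])) := by
  induction rest using List.reverseRecOn with
  | nil =>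
    have hdp1 : PySem.List.pyGetD [a0, max a0 a1] 1 0 = max a0 a1 := by
      simp [PySem.List.pyGetD, PySem.List.pyGet?, PySem.List.pyIdx?]
    have harr1 : PySem.List.pyGetD [a0, a1] 1 0 = a1 := by
      simp [PySem.List.pyGetD, PySem.List.pyGet?, PySem.List.pyIdx?]
    by_cases h : a0 ≤ a1
    · simp [dplAux, btA_zero, btA_one, harr1, h, ge_iff_le]
    · have hmx : max a0 a1 = a0 := max_eq_left (by omega)
      have hne : ¬ (a0 = a1) := by omega
      have hdp1' : PySem.List.pyGetD [a0, a0] 1 0 = a0 := by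
        simp [PySem.List.pyGetD, PySem.List.pyGet?, PySem.List.pyIdx?]
      simp [dplAux, btA_zero, btA_one, harr1, hmx, hne, h, ge_iff_le, hdp1']
  | append_singleton xs x ih =>
    obtain ⟨hA2, hA1⟩ := chain_getD a0 (max a0 a1) xs
    have hlen : (dplAux a0 (max a0 a1) xs).length = xs.length := dplAux_length a0 (max a0 a1) xs
    have hdp' : dplAux a0 (max a0 a1) (xs ++ [x]) =
        dplAux a0 (max a0 a1) xs ++ [max (dlast a0 (max a0 a1) xs).2 ((dlast a0 (max a0 a1) xs).1 + x)] :=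
      dplAux_snoc a0 (max a0 a1) xs x
    rw [PySem.List.enumerate_append, List.foldl_append, ih]
    rw [show PySem.List.enumerate [x] (2 + (xs.length : Int)) = [((2 + (xs.length : Int)), x)] from rfl]
    rw [List.foldl_cons, List.foldl_nil]
    rw [hA2, hA1, hdp']
    simp only [List.length_append, List.length_cons, List.length_nil, Nat.cast_add,
      Nat.cast_one, zero_add]
    set L2 := (dlast a0 (max a0 a1) xs).1 with hL2
    set L1 := (dlast a0 (max a0 a1) xs).2 with hL1
    set u := dplAux a0 (max a0 a1) xs with hu
    have hulen : u.length = xs.length := by rw [hu]; exact dplAux_length a0 (max a0 a1) xs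
    have hdplen : (a0 :: max a0 a1 :: u).length = xs.length + 2 := by simp [hulen]
    have hlist : a0 :: max a0 a1 :: (u ++ [max L1 (L2 + x)]) =
        (a0 :: max a0 a1 :: u) ++ [max L1 (L2 + x)] := rfl
    have harr2 : a0 :: a1 :: (xs ++ [x]) = (a0 :: a1 :: xs) ++ [x] := rfl
    rw [hlist, harr2]
    have hidx : (2 + (xs.length : Int)) = ((xs.length : Int) + 1 + 1) := by ring
    rw [hidx]
    have G1 : ((a0 :: max a0 a1 :: u) ++ [max L1 (L2 + x)]).getD (xs.length + 1) 0 = L1 := by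
      rw [List.getD_append _ _ _ _ (by simp [hulen])]
      exact hA1
    have Gtop : ((a0 :: max a0 a1 :: u) ++ [max L1 (L2 + x)]).getD (xs.length + 1 + 1) 0
        = max L1 (L2 + x) := by
      rw [List.getD_append_right _ _ _ _ (by omega)]
      simp [hdplen]
    have harrlen : (a0 :: a1 :: xs).length = (a0 :: max a0 a1 :: u).length := by simp [hulen]
    have BT1 : btA ((a0 :: a1 :: xs) ++ [x]) ((a0 :: max a0 a1 :: u) ++ [max L1 (L2 + x)])
        ((xs.length : Int) + 1) []
        = btA (a0 :: a1 :: xs) (a0 :: max a0 a1 :: u) ((xs.length : Int) + 1) [] :=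
      btA_agree _ _ _ _ harrlen _ (by rw [hdplen]; push_cast; omega) []
    have BT2 : btA ((a0 :: a1 :: xs) ++ [x]) ((a0 :: max a0 a1 :: u) ++ [max L1 (L2 + x)])
        ((xs.length : Int)) []
        = btA (a0 :: a1 :: xs) (a0 :: max a0 a1 :: u) ((xs.length : Int)) [] :=
      btA_agree _ _ _ _ harrlen _ (by rw [hdplen]; push_cast; omega) []
    have e22 : ((xs.length : Int) + 1 + 1) = ((xs.length + 2 : Nat) : Int) := by omega
    have BTtop := btA_ge2 ((a0 :: a1 :: xs) ++ [x]) ((a0 :: max a0 a1 :: u) ++ [max L1 (L2 + x)])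
      ((xs.length : Int) + 1 + 1) [] (by omega)
    have r1 : PySem.List.pyGetD ((a0 :: max a0 a1 :: u) ++ [max L1 (L2 + x)])
        ((xs.length : Int) + 1 + 1) 0 = max L1 (L2 + x) := by
      rw [e22, PySem.List.pyGetD_natCast, List.getD_append_right _ _ _ _ (by omega)]
      simp [hdplen]
    have r2 : PySem.List.pyGetD ((a0 :: max a0 a1 :: u) ++ [max L1 (L2 + x)])
        ((xs.length : Int) + 1 + 1 - 2) 0 = L2 := by
      have e0 : ((xs.length : Int) + 1 + 1 - 2) = ((xs.length : Nat) : Int) := by omega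
      rw [e0, PySem.List.pyGetD_natCast, List.getD_append _ _ _ _ (by omega)]
      exact hA2
    have r3 : PySem.List.pyGetD ((a0 :: a1 :: xs) ++ [x]) ((xs.length : Int) + 1 + 1) 0 = x := by
      rw [e22, PySem.List.pyGetD_natCast, List.getD_append_right _ _ _ _ (by simp)]
      simp
    rw [r1, r2, r3] at BTtop
    by_cases hc : L1 ≤ L2 + x
    · rw [if_pos (max_eq_right hc)] at BTtop
      have e0 : ((xs.length : Int) + 1 + 1 - 2) = ((xs.length : Int)) := by ring
      rw [e0] at BTtop
      rw [btA_acc ((a0 :: a1 :: xs) ++ [x]) ((a0 :: max a0 a1 :: u) ++ [max L1 (L2 + x)])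
            ((xs.length : Int)) ([] ++ [((xs.length : Int) + 1 + 1)])] at BTtop
      rw [BT2] at BTtop
      rw [BTtop, BT1, G1, Gtop, if_pos (show L2 + x ≥ L1 from hc)]
      simp [max_eq_right hc]
    · have hmaxl : max L1 (L2 + x) = L1 := max_eq_left (by omega)
      rw [if_neg (by omega : ¬ max L1 (L2 + x) = L2 + x)] at BTtop
      have e1 : ((xs.length : Int) + 1 + 1 - 1) = ((xs.length : Int) + 1) := by ring
      rw [e1, BT1] at BTtop
      rw [BTtop, BT1, G1, Gtop, if_neg (show ¬ L2 + x ≥ L1 from by omega)]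
      simp [hmaxl]

-- ===== VERDICT (by name: the statement is the Claim_ definition above) =====
theorem A_cons (a0 a1 : Int) (rest : List Int) :
    max_subset_with_indices (a0 :: a1 :: rest) =
      (PySem.List.pyGetD (a0 :: max a0 a1 :: dplAux a0 (max a0 a1) rest) (-1) 0,
       (btA (a0 :: a1 :: rest) (a0 :: max a0 a1 :: dplAux a0 (max a0 a1) rest)
          ((rest.length : Int) + 1) []).reverse) := by
  have h1 : ¬(a0 :: a1 :: rest = ([] : List Int)) := by simp
  have h2 : ¬((a0 :: a1 :: rest).length = 1) := by simp
  simp only [max_subset_with_indices, if_neg h1, if_neg h2]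
  rw [dp2_eq]
  rw [show ((a0 :: a1 :: rest).length : Int) = ((rest.length : Int) + 1 + 1) from by
    simp only [List.length_cons]; push_cast; ring]
  have hloop := loop_eq (a0 :: a1 :: rest) rest [a0, max a0 a1] (by simp)
    (by simp; omega) (by simp)
  norm_num [List.getD] at hloop
  rw [hloop]
  rw [show ((rest.length : Int) + 1 + 1 - 1) = ((rest.length : Int) + 1) from by ring]

theorem max_subset_with_indices_spec : Claim_equal_max_subset_with_indices := by
  unfold Claim_equal_max_subset_with_indices
  intro array _
  unfold Spec_max_subset_with_indices
  match array with
  | [] => rfl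
  | [a] => rfl
  | a0 :: a1 :: rest =>
    rw [A_cons]
    have hne : (a0 :: max a0 a1 :: dplAux a0 (max a0 a1) rest) ≠ [] := by simp
    have hlast : PySem.List.pyGetD (a0 :: max a0 a1 :: dplAux a0 (max a0 a1) rest) (-1) 0
        = (a0 :: max a0 a1 :: dplAux a0 (max a0 a1) rest).getD (rest.length + 1) 0 := by
      rw [PySem.List.pyGetD_neg_one _ _ hne]
      rw [List.getLast_eq_getElem]
      rw [List.getD_eq_getElem _ _ (by simp [dplAux_length])]
      congr 1
      simp [dplAux_length]
    rw [hlast]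
    show _ = max_subset_with_indices_alt (a0 :: a1 :: rest)
    simp only [max_subset_with_indices_alt]
    rw [inv a0 a1 rest]
    simp [flattenChain_id]
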